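-- pv_equiv track=rewrite | github.com/google/dart-gl | tools/default_generator/extension_generator.py | normalize_pointers
-- ===== SOURCE A (Python) =====
-- def normalize_pointers(initial_type, initial_name):
--   """Normalizes pointers to sit with the type.
--
--   Examples:
--     (int, *hello) -> (int*, hello)
--     (const int, **const*hello) -> (const int**const, hello)
--
--   cdecl.org says the second one means
--   "declare hello as const pointer to pointer to const int"
--
--   Args:
--     initial_type: String with initial type
--     initial_name: String with initial name
--   Returns:
--     A tuple with the normalized type and name (type, name)
--   """
--   while initial_name.startswith(("*", "&", "const*")):
--     if initial_name.startswith("*"):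
--       initial_type += "*"
--       initial_name = initial_name[1:]
--     elif initial_name.startswith("&"):
--       initial_type += "&"
--       initial_name = initial_name[1:]
--     elif initial_name.startswith("const*"):
--       initial_type += "const*"
--       initial_name = initial_name[6:]
--
--   return (initial_type, initial_name)
-- ===== SOURCE B (Python) =====
-- import re
--
-- _PREFIX = re.compile(r"(?:\*|&|const\*)*")
--
-- def normalize_pointers(initial_type, initial_name):
--   prefix = _PREFIX.match(initial_name).group(0)
--   return (initial_type + prefix, initial_name[len(prefix):])
-- ===== Notes on version B (the rewrite author's own statement) =====
-- stated objective: idiomatic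
-- what changed: Replaces the while loop that peels one pointer token per iteration and appends to the type with a single anchored regex match capturing the whole */&/const* prefix at once, then one concatenation and one slice.
import Mathlib
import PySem

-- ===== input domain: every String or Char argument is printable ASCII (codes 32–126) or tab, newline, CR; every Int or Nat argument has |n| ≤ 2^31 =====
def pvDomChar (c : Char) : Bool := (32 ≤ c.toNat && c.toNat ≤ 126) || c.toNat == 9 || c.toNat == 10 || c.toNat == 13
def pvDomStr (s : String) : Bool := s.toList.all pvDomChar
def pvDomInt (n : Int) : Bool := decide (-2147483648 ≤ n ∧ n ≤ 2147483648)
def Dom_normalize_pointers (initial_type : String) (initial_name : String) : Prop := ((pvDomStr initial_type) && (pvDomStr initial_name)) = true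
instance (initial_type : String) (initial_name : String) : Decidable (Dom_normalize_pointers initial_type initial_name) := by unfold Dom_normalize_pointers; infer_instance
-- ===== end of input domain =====

-- ===== PORT A =====
-- B replaces A's token-at-a-time while loop by one anchored greedy match of the whole prefix (idiomatic); return values only, no mutation.
-- Python str.startswith(p) on ASCII strings = List.isPrefixOf on the char lists (exact here).
def pvSw (p n : List Char) : Bool := p.isPrefixOf n

-- the while loop of A: peels one token per iteration, appending it to the type
def pvALoop (t n : List Char) : List Char × List Char :=
  if pvSw ['*'] n || pvSw ['&'] n || pvSw ['c','o','n','s','t','*'] n then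
    if pvSw ['*'] n then pvALoop (t ++ ['*']) (n.drop 1)
    else if pvSw ['&'] n then pvALoop (t ++ ['&']) (n.drop 1)
    else pvALoop (t ++ ['c','o','n','s','t','*']) (n.drop 6)
  else (t, n)
termination_by n.length
decreasing_by
  · cases n <;> simp_all [pvSw, List.isPrefixOf]
  · cases n <;> simp_all [pvSw, List.isPrefixOf]
  · cases n <;> simp_all [pvSw, List.isPrefixOf]

def normalize_pointers (initial_type : String) (initial_name : String) : String × String :=
  let r := pvALoop initial_type.toList initial_name.toList
  (String.mk r.1, String.mk r.2)

-- ===== PORT B =====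
-- length of the greedy anchored match of (?:\*|&|const\*)* ; the three alternatives are
-- disjoint by first character, so the regex engine's greedy left-to-right match is exactly
-- this recursion (exact on the ASCII domain).
def pvMatchLen (n : List Char) : Nat :=
  if ['*'].isPrefixOf n then 1 + pvMatchLen (n.drop 1)
  else if ['&'].isPrefixOf n then 1 + pvMatchLen (n.drop 1)
  else if ['c','o','n','s','t','*'].isPrefixOf n then 6 + pvMatchLen (n.drop 6)
  else 0
termination_by n.length
decreasing_by
  · cases n <;> simp_all [List.isPrefixOf]
  · cases n <;> simp_all [List.isPrefixOf]
  · cases n <;> simp_all [List.isPrefixOf]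

def normalize_pointers_alt (initial_type : String) (initial_name : String) : String × String :=
  let k := pvMatchLen initial_name.toList
  (String.mk (initial_type.toList ++ initial_name.toList.take k),
   String.mk (initial_name.toList.drop k))
-- ===== PRECONDITION & SPEC =====
def Spec_normalize_pointers (initial_type : String) (initial_name : String) (out : String × String) : Prop := out = normalize_pointers_alt initial_type initial_name
instance (initial_type : String) (initial_name : String) (out : String × String) : Decidable (Spec_normalize_pointers initial_type initial_name out) := by unfold Spec_normalize_pointers; infer_instance

-- ===== CLAIM (what is proved, stated in full; the proofs are below) =====
def Claim_equal_normalize_pointers : Prop := ∀ (initial_type : String) (initial_name : String), Dom_normalize_pointers initial_type initial_name → Spec_normalize_pointers initial_type initial_name (normalize_pointers initial_type initial_name)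

-- ===== LEMMAS AND PROOFS =====

-- ===== VERDICT (by name: the statement is the Claim_ definition above) =====
theorem pvALoop_eq (t n : List Char) : pvALoop t n =
    (t ++ n.take (pvMatchLen n), n.drop (pvMatchLen n)) := by
  induction t, n using pvALoop.induct with
  | case1 t n hc h ih =>
      obtain ⟨r, rfl⟩ := List.isPrefixOf_iff_prefix.mp h
      rw [pvALoop, pvMatchLen]
      simp_all [pvSw, List.isPrefixOf, Nat.add_comm 1]
  | case2 t n hc h1 h2 ih =>
      obtain ⟨r, rfl⟩ := List.isPrefixOf_iff_prefix.mp h2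
      rw [pvALoop, pvMatchLen]
      simp_all [pvSw, List.isPrefixOf, Nat.add_comm 1]
  | case3 t n hc h1 h2 ih =>
      have h3 : (['c','o','n','s','t','*'].isPrefixOf n) = true := by
        simp only [pvSw, Bool.or_eq_true] at hc
        rcases hc with (hc | hc) | hc
        · exact absurd hc h1
        · exact absurd hc h2
        · exact hc
      obtain ⟨r, rfl⟩ := List.isPrefixOf_iff_prefix.mp h3
      rw [pvALoop, pvMatchLen]
      have ht := List.take_length_add_append (l₁ := ['c','o','n','s','t','*']) (l₂ := r) (pvMatchLen r)
      simp only [List.length_cons, List.length_nil] at ht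
      simp_all [pvSw, List.isPrefixOf, Nat.add_comm 6, ht]
  | case4 t n hc =>
      rw [pvALoop, pvMatchLen]
      simp only [pvSw, Bool.or_eq_true, not_or] at hc
      rcases hc with ⟨⟨ha, hb⟩, hcc⟩
      simp [pvSw, ha, hb, hcc]

theorem normalize_pointers_spec : Claim_equal_normalize_pointers := by
  intro t n _
  show _ = _
  simp [normalize_pointers, normalize_pointers_alt, pvALoop_eq]
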